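-- pv_equiv track=rewrite | github.com/Victoria-Rodrigues/Grafo-BibliotecaVersao1.1 | Classes/Grafo.py | pegarVerticeMaiorSaturacao
-- ===== SOURCE A (Python) =====
-- def pegarVerticeMaiorSaturacao(listaVerticesDic):
--     maior = listaVerticesDic[0]["saturacao"]
--     verticeMaior = listaVerticesDic[0]["vertice"]
--     cont = 0
--
--     for i in range(1,len(listaVerticesDic)):
--         if listaVerticesDic[i]["saturacao"] > maior:
--             maior = listaVerticesDic[i]["saturacao"]
--             verticeMaior = listaVerticesDic[i]["vertice"]
--
--         elif listaVerticesDic[i]["saturacao"] == maior: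
--             cont += 1
--
--     return verticeMaior,len(listaVerticesDic) == cont + 1 # se for verdadeiro significa que todos os valores de saturação sao iguais
-- ===== SOURCE B (Python) =====
-- def pegarVerticeMaiorSaturacao(listaVerticesDic):
--     primeira = listaVerticesDic[0]["saturacao"]
--     melhor = max(listaVerticesDic, key=lambda d: d["saturacao"])
--     todasIguais = all(d["saturacao"] == primeira for d in listaVerticesDic)
--     return melhor["vertice"], todasIguais
-- ===== Notes on version B (the rewrite author's own statement) =====
-- stated objective: simpler
-- what changed: A's single loop threading a (maior, verticeMaior, cont) triple with cont-sentinel arithmetic is replaced by two separate passes: max(lista, key=...) for the first maximum vertex and all(...) for the all-equal flag.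
import Mathlib
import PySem

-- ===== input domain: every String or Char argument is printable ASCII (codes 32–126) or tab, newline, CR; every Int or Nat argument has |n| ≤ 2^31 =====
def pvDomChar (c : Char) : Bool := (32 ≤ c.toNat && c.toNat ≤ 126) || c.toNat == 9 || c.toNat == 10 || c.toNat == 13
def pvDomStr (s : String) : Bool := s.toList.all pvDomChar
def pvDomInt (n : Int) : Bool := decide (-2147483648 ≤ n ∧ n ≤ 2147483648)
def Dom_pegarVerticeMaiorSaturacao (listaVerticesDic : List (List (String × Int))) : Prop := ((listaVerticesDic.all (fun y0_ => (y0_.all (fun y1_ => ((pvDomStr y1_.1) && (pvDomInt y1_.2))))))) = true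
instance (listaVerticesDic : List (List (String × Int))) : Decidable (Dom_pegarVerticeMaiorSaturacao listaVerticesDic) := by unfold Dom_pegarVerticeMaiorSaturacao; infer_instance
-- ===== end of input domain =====

-- B replaces A's single loop with cont-sentinel arithmetic by two clearly separated passes:
-- max(lista, key=…) for the first maximum vertex and all(…) for the all-equal flag (objective: simpler).

-- shared dict-lookup helpers: d["saturacao"] / d["vertice"]; the default 0 is reached only where
-- Python raises KeyError, which Pre_ excludes
def pvSat (d : List (String × Int)) : Int := (PySem.Dict.mk d).getD "saturacao" 0
def pvVert (d : List (String × Int)) : Int := (PySem.Dict.mk d).getD "vertice" 0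

-- ===== PORT A =====
-- loop body of A: update (maior, verticeMaior, cont)
def pvStep (st : Int × Int × Int) (d : List (String × Int)) : Int × Int × Int :=
  if pvSat d > st.1 then (pvSat d, pvVert d, st.2.2)
  else if pvSat d = st.1 then (st.1, st.2.1, st.2.2 + 1)
  else st

def pegarVerticeMaiorSaturacao (listaVerticesDic : List (List (String × Int))) : Int × Bool :=
  let s := (PySem.List.pyRange 1 (PySem.List.len listaVerticesDic)).foldl
    (fun st i => pvStep st (PySem.List.pyGetD listaVerticesDic i []))
    (pvSat (PySem.List.pyGetD listaVerticesDic 0 []),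
     pvVert (PySem.List.pyGetD listaVerticesDic 0 []), 0)
  (s.2.1, decide (PySem.List.len listaVerticesDic = s.2.2 + 1))

-- ===== PORT B =====
def pegarVerticeMaiorSaturacao_alt (listaVerticesDic : List (List (String × Int))) : Int × Bool :=
  let primeira := pvSat (PySem.List.pyGetD listaVerticesDic 0 [])
  let melhor := (PySem.List.max? listaVerticesDic pvSat).getD []
  (pvVert melhor, listaVerticesDic.all (fun d => pvSat d == primeira))

-- ===== PRECONDITION & SPEC =====
-- Pre_ excludes the empty list (IndexError in A) and dicts missing the "saturacao" or "vertice"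
-- key (KeyError); for uniformity it requires "vertice" in EVERY dict although A only reads it on
-- running-maximum elements, so a few inputs on which both programs still return are excluded.
def Pre_pegarVerticeMaiorSaturacao (listaVerticesDic : List (List (String × Int))) : Prop :=
  listaVerticesDic ≠ [] ∧ ∀ d ∈ listaVerticesDic,
    ((PySem.Dict.mk d).get? "saturacao").isSome ∧ ((PySem.Dict.mk d).get? "vertice").isSome
instance (listaVerticesDic : List (List (String × Int))) : Decidable (Pre_pegarVerticeMaiorSaturacao listaVerticesDic) := by unfold Pre_pegarVerticeMaiorSaturacao; infer_instance
def pvWitness_pegarVerticeMaiorSaturacao : (List (List (String × Int))) :=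
  [[("saturacao", 2), ("vertice", 1)], [("saturacao", 3), ("vertice", 4)]]

def Spec_pegarVerticeMaiorSaturacao (listaVerticesDic : List (List (String × Int))) (out : Int × Bool) : Prop := out = pegarVerticeMaiorSaturacao_alt listaVerticesDic
instance (listaVerticesDic : List (List (String × Int))) (out : Int × Bool) : Decidable (Spec_pegarVerticeMaiorSaturacao listaVerticesDic out) := by unfold Spec_pegarVerticeMaiorSaturacao; infer_instance

-- ===== CLAIM (what is proved, stated in full; the proofs are below) =====
def Claim_equal_pegarVerticeMaiorSaturacao : Prop := ∀ (listaVerticesDic : List (List (String × Int))), Dom_pegarVerticeMaiorSaturacao listaVerticesDic → Pre_pegarVerticeMaiorSaturacao listaVerticesDic → Spec_pegarVerticeMaiorSaturacao listaVerticesDic (pegarVerticeMaiorSaturacao listaVerticesDic)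

-- ===== LEMMAS AND PROOFS =====

-- the running-maximum fold B's max? computes
def pvBest (b : List (String × Int)) (xs : List (List (String × Int))) : List (String × Int) :=
  xs.foldl (fun m y => if pvSat m < pvSat y then y else m) b

theorem pvStep_best : ∀ (xs : List (List (String × Int))) (b : List (String × Int)) (v c : Int),
    v = pvVert b →
    ((xs.foldl pvStep (pvSat b, v, c)).1, (xs.foldl pvStep (pvSat b, v, c)).2.1)
      = (pvSat (pvBest b xs), pvVert (pvBest b xs)) := by
  intro xs
  induction xs with
  | nil => intro b v c hv; simp [pvBest, hv]
  | cons y ys ih =>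
    intro b v c hv
    simp only [List.foldl_cons, pvBest, pvStep]
    by_cases h1 : pvSat b < pvSat y
    · simp only [gt_iff_lt, h1, if_pos]
      exact ih y (pvVert y) c rfl
    · simp only [gt_iff_lt, h1, if_false]
      by_cases h2 : pvSat y = pvSat b
      · simp only [h2, if_pos]
        exact ih b v (c + 1) hv
      · simp only [h2, if_false]
        exact ih b v c hv

theorem pvStep_cont_le : ∀ (xs : List (List (String × Int))) (st : Int × Int × Int),
    (xs.foldl pvStep st).2.2 ≤ st.2.2 + xs.length := by
  intro xs
  induction xs with
  | nil => intro st; simp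
  | cons y ys ih =>
    intro st
    simp only [List.foldl_cons, List.length_cons]
    have h := ih (pvStep st y)
    have hstep : (pvStep st y).2.2 ≤ st.2.2 + 1 := by
      unfold pvStep; split_ifs <;> simp
    omega

theorem pvStep_cont_eq_iff : ∀ (xs : List (List (String × Int))) (st : Int × Int × Int),
    ((xs.foldl pvStep st).2.2 = st.2.2 + xs.length ↔ ∀ y ∈ xs, pvSat y = st.1) := by
  intro xs
  induction xs with
  | nil => intro st; simp
  | cons y ys ih =>
    intro st
    rw [List.foldl_cons, List.forall_mem_cons]
    rcases lt_trichotomy st.1 (pvSat y) with h1 | h2 | h3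
    · have hs : pvStep st y = (pvSat y, pvVert y, st.2.2) := by
        unfold pvStep; rw [if_pos h1]
      rw [hs]
      constructor
      · intro h
        exfalso
        have hle := pvStep_cont_le ys (pvSat y, pvVert y, st.2.2)
        simp only [List.length_cons] at h
        simp only at hle
        push_cast at h hle; omega
      · intro h; exfalso; have := h.1; omega
    · have hs : pvStep st y = (st.1, st.2.1, st.2.2 + 1) := by
        unfold pvStep; rw [if_neg (by omega), if_pos h2.symm]
      rw [hs]
      have hi := ih (st.1, st.2.1, st.2.2 + 1)
      simp only at hi
      constructor
      · intro h
        refine ⟨h2.symm, hi.mp ?_⟩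
        simp only [List.length_cons] at h
        push_cast at h ⊢; omega
      · intro h
        have hc := hi.mpr h.2
        simp only [List.length_cons]
        push_cast at hc ⊢; omega
    · have hs : pvStep st y = st := by
        unfold pvStep; rw [if_neg (by omega), if_neg (by omega)]
      rw [hs]
      constructor
      · intro h
        exfalso
        have hle := pvStep_cont_le ys st
        simp only [List.length_cons] at h
        push_cast at h hle; omega
      · intro h; exfalso; have := h.1; omega

theorem max?_cons_eq : ∀ (xs : List (List (String × Int))) (x : List (String × Int)),
    PySem.List.max? (x :: xs) pvSat = some (pvBest x xs) := by
  intro xs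
  induction xs with
  | nil => intro x; simp [PySem.List.max?, pvBest]
  | cons y ys ih =>
    intro x
    have hx : PySem.List.max? (x :: y :: ys) pvSat
        = PySem.List.max? ((if pvSat x < pvSat y then y else x) :: ys) pvSat := by
      simp only [PySem.List.max?, List.foldl_cons]
      split_ifs <;> rfl
    rw [hx, ih]
    simp only [pvBest, List.foldl_cons]

-- ===== VERDICT (by name: the statement is the Claim_ definition above) =====
theorem pegarVerticeMaiorSaturacao_spec : Claim_equal_pegarVerticeMaiorSaturacao := by
  intro l _hdom hpre
  obtain ⟨hne, -⟩ := hpre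
  obtain ⟨x, xs, rfl⟩ := List.exists_cons_of_ne_nil hne
  show pegarVerticeMaiorSaturacao (x :: xs) = pegarVerticeMaiorSaturacao_alt (x :: xs)
  unfold pegarVerticeMaiorSaturacao pegarVerticeMaiorSaturacao_alt
  have hget0 : PySem.List.pyGetD (x :: xs) 0 [] = x := by
    simp [PySem.List.pyGetD]
  have hfold := PySem.List.foldl_pyRange_pyGetD (x :: xs) []
      pvStep (pvSat x, pvVert x, 0) (a := 1) (by norm_num)
  simp only [hget0, hfold, Int.toNat_one, List.drop_succ_cons, List.drop_zero,
    max?_cons_eq, Option.getD_some]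
  have hbv := pvStep_best xs x (pvVert x) 0 rfl
  have hiff := pvStep_cont_eq_iff xs (pvSat x, pvVert x, 0)
  simp only at hiff
  refine Prod.ext ?_ ?_
  · simpa using congrArg Prod.snd hbv
  · simp only [PySem.List.len_eq, List.length_cons, List.all_cons, beq_self_eq_true,
      Bool.true_and]
    cases hall : xs.all (fun d => pvSat d == pvSat x) with
    | false =>
      rw [decide_eq_false_iff_not]
      intro h
      have hc : (List.foldl pvStep (pvSat x, pvVert x, 0) xs).2.2 = 0 + (xs.length : Int) := by
        push_cast at h ⊢; omega
      have hall2 : xs.all (fun d => pvSat d == pvSat x) = true :=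
        List.all_eq_true.mpr (fun z hz => by simp [hiff.mp hc z hz])
      rw [hall] at hall2; exact Bool.false_ne_true hall2
    | true =>
      simp only [decide_eq_true_eq]
      have hc := hiff.mpr (fun z hz => by
        have := List.all_eq_true.mp hall z hz; simpa using this)
      push_cast at hc ⊢; omega
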